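-- pv_equiv track=rewrite | github.com/JedimasterLu/pyhtp | pyhtp/ternary/scatter.py | rotate_data
-- ===== SOURCE A (Python) =====
-- def _get_width(index: list) -> int:
--     '''_get_width return the width of the ternary diagram.
--
--     Args:
--         index (list): The index of the points.
--
--     Returns:
--         int: The width of the diagram.
--
--     Raises:
--         ValueError: The index length is not a triangle number!
--     '''
--     # Set the initial value as the approximate value of the width by solving width * (width + 1) / 2 == length
--     length = len(index)
--     width = (-1 + (1 + 8 * length) ** 0.5) / 2
--     width = int(width) - 2
--     # check if there exist a width such that width * (width + 1) / 2 == length, if not, raise error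
--     while width * (width + 1) / 2 < length:
--         width += 1
--     if width * (width + 1) / 2 != length:
--         raise ValueError('The index length is not a triangle number!')
--     return width
--
-- def rotate_data(data: list[str]) -> list[str]:
--     '''_rotate_phase_index rotate the whole ternary diagram by 60 degrees counter-clockwise.
--
--     Args:
--         width (int): The width of the diagram.
--         phase_index (list[int]): Define the phase of each point.
--
--     Returns:
--         list[int]: _description_
--     '''
--     def _snake_to_serial(width: int, data: list[str]) -> list[str]:
--         '''Convert the snake form index to serial form index.'''
--         serial_phase_index = data.copy()
--         # Reverse the index of even rows
--         for row in range(width):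
--             if row % 2 != 0:
--                 start_index = (row + 1) * (width + width - row) // 2 - 1
--                 end_index = start_index - width + row + 1
--                 for column in range(end_index, start_index + 1):
--                     serial_phase_index[column] = data[start_index - column + end_index]
--         return serial_phase_index
--     # Create mapping relationship of rotation
--     mapping = []
--     width = _get_width(data)
--     for row in range(width):
--         current_width = width - row
--         # Extend the index of the right row into mapping
--         for column in range(current_width):
--             mapping.append(current_width - 1 + column * (width - 1 + width - column) // 2)
--     # Map the phase index
--     data = _snake_to_serial(width, data)
--     rotated_data = [data[mapping[i]] for i in range(len(data))]
--     rotated_data = [rotated_data[mapping[i]] for i in range(len(data))]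
--     rotated_data = _snake_to_serial(width, rotated_data)
--     return rotated_data
-- ===== SOURCE B (Python) =====
-- def rotate_data(data: list[str]) -> list[str]:
--     # One-pass gather: each output cell's source index is computed by an explicit
--     # coordinate transform on the triangle (120-degree rotation = 60-degree step twice),
--     # keeping the snake (boustrophedon) row convention.
--     n = len(data)
--     w = 0
--     t = 0
--     while t < n:
--         w += 1
--         t += w
--     if t != n:
--         raise ValueError('The index length is not a triangle number!')
--     out = []
--     for r in range(w):
--         rowlen = w - r
--         for c in range(rowlen):
--             cc = c if r % 2 == 0 else rowlen - 1 - c   # de-snake the output column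
--             sr = w - 1 - r - cc                        # rotated source cell (serial coords)
--             sc = r
--             k = sr * (2 * w + 1 - sr) // 2 + (sc if sr % 2 == 0 else w - 1 - sr - sc)
--             out.append(data[k])
--     return out
-- ===== Notes on version B (the rewrite author's own statement) =====
-- stated objective: simpler
-- what changed: B replaces A's de-snake/permutation-list/apply-twice/re-snake pipeline with a single pass that computes each output cell's source index by an explicit 120-degree coordinate transform on the triangle (and finds the width by an integer running-sum check instead of a float sqrt solve).
import Mathlib
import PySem

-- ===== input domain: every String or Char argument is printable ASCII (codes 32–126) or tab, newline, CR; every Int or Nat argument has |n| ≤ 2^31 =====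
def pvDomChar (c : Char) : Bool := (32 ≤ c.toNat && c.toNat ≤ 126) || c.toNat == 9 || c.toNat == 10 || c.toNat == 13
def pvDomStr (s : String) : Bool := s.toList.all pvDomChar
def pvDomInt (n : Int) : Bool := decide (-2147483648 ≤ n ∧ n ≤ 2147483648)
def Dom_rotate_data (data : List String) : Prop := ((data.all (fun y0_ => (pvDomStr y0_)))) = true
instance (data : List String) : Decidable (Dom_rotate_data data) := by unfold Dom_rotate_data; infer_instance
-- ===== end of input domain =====

-- B replaces A's de-snake / permutation-list / apply-twice / re-snake pipeline with a
-- single pass computing each output cell's source index by an explicit 120° coordinate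
-- transform on the triangle (objective: simpler). Pre_ = positive triangle-number length:
-- on every other length (including []) A raises ValueError.


-- ===== PORT A =====
-- 'while width*(width+1)/2 < length: width += 1', fuel-guarded (fuel length+4 always suffices).
-- width*(width+1) is even and nonneg, so Python's float '/2' compare is the exact Int one.
def pvWhileA : Nat → Int → Int → Int
  | 0, width, _ => width
  | fuel+1, width, length =>
    if width * (width + 1) / 2 < length then pvWhileA fuel (width + 1) length else width

-- _get_width; none = ValueError.  The float seed 'int((-1+(1+8*length)**0.5)/2)' is ported
-- via Nat.sqrt: exact, because the seed only initialises the corrective while loop (the -2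
-- keeps any ≤1-ulp float error a lower bound; on triangle lengths the float sqrt is exact).
def pvGetWidth (index : List String) : Option Int :=
  let length : Int := index.length
  let width : Int := (((Nat.sqrt (1 + 8 * index.length) - 1) / 2 : Nat) : Int) - 2
  let width := pvWhileA (index.length + 4) width length
  if width * (width + 1) / 2 ≠ length then none else some width

-- _snake_to_serial; 'serial[column] = data[…]' is List.set at column.toNat (the loop only
-- visits in-range nonnegative columns), the read 'data[…]' is pyGetD (always in range here)
def pvSnakeToSerial (width : Int) (data : List String) : List String :=
  (PySem.List.pyRange 0 width 1).foldl (fun serial row =>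
    if PySem.Int.mod row 2 ≠ 0 then
      let startIndex := PySem.Int.floordiv ((row + 1) * (width + width - row)) 2 - 1
      let endIndex := startIndex - width + row + 1
      (PySem.List.pyRange endIndex (startIndex + 1) 1).foldl
        (fun serial column =>
          serial.set column.toNat (PySem.List.pyGetD data (startIndex - column + endIndex) ""))
        serial
    else serial) data

def rotate_data (data : List String) : List String :=
  match pvGetWidth data with
  | none => []   -- ValueError: excluded by Pre_
  | some width =>
    let mapping : List Int :=
      (PySem.List.pyRange 0 width 1).foldl (fun mapping row =>
        let currentWidth := width - row
        (PySem.List.pyRange 0 currentWidth 1).foldl (fun mapping column =>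
          mapping ++ [currentWidth - 1 +
            PySem.Int.floordiv (column * (width - 1 + width - column)) 2]) mapping) []
    let data1 := pvSnakeToSerial width data
    let rotated1 := (PySem.List.pyRange 0 (data1.length : Int) 1).map
      (fun i => PySem.List.pyGetD data1 (PySem.List.pyGetD mapping i 0) "")
    let rotated2 := (PySem.List.pyRange 0 (data1.length : Int) 1).map
      (fun i => PySem.List.pyGetD rotated1 (PySem.List.pyGetD mapping i 0) "")
    pvSnakeToSerial width rotated2

-- ===== PORT B =====
-- 'while t < n: w += 1; t += w', fuel-guarded (fuel length+1 always suffices)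
def pvWhileB : Nat → Int × Int → Int → Int × Int
  | 0, wt, _ => wt
  | fuel+1, (w, t), n => if t < n then pvWhileB fuel (w + 1, t + (w + 1)) n else (w, t)

def rotate_data_alt (data : List String) : List String :=
  let n : Int := data.length
  let wt := pvWhileB (data.length + 1) (0, 0) n
  let w := wt.1
  if wt.2 ≠ n then []  -- ValueError
  else
    (PySem.List.pyRange 0 w 1).foldl (fun out r =>
      let rowlen := w - r
      (PySem.List.pyRange 0 rowlen 1).foldl (fun out c =>
        let cc := if PySem.Int.mod r 2 = 0 then c else rowlen - 1 - c
        let sr := w - 1 - r - cc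
        let sc := r
        let k := PySem.Int.floordiv (sr * (2 * w + 1 - sr)) 2 +
          (if PySem.Int.mod sr 2 = 0 then sc else w - 1 - sr - sc)
        out ++ [PySem.List.pyGetD data k ""]) out) []

-- ===== PRECONDITION & SPEC =====
-- Pre_: the length is a positive triangle number — exactly the inputs where A returns
-- normally (on every other length, including 0, _get_width raises ValueError).
def Pre_rotate_data (data : List String) : Prop :=
  ∃ w, w < data.length + 1 ∧ 1 ≤ w ∧ 2 * data.length = w * (w + 1)
instance (data : List String) : Decidable (Pre_rotate_data data) := by
  unfold Pre_rotate_data; infer_instance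
def pvWitness_rotate_data : List String := ["a", "b", "c"]

def Spec_rotate_data (data : List String) (out : List String) : Prop := out = rotate_data_alt data
instance (data : List String) (out : List String) : Decidable (Spec_rotate_data data out) := by unfold Spec_rotate_data; infer_instance

-- ===== CLAIM (what is proved, stated in full; the proofs are below) =====
def Claim_equal_rotate_data : Prop := ∀ (data : List String), Dom_rotate_data data → Pre_rotate_data data → Spec_rotate_data data (rotate_data data)

-- ===== LEMMAS AND PROOFS =====

-- ascending triangle numbers
def pvT : Nat → Nat
  | 0 => 0
  | k+1 => pvT k + (k+1)

-- prefix sums of row lengths w, w-1, …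
def pvS (w : Nat) : Nat → Nat
  | 0 => 0
  | r+1 => pvS w r + (w - r)

lemma pvT_two (k : Nat) : 2 * (pvT k : Int) = k * (k + 1) := by
  induction k with
  | zero => simp [pvT]
  | succ k ih => simp only [pvT]; push_cast; linear_combination ih

lemma pvS_two (w : Nat) : ∀ r, r ≤ w → 2 * (pvS w r : Int) = r * (2 * w + 1 - r) := by
  intro r
  induction r with
  | zero => simp [pvS]
  | succ r ih =>
    intro h
    have h1 : r ≤ w := by omega
    have h2 : (((w : Int)) - r) = ((w - r : Nat) : Int) := by
      have := Int.ofNat_sub h1; omega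
    simp only [pvS]; push_cast [← h2]; linear_combination ih h1

lemma pvS_self (w : Nat) : pvS w w = pvT w := by
  have h1 := pvS_two w w le_rfl
  have h2 := pvT_two w
  have : (pvS w w : Int) = (pvT w : Int) := by linarith
  exact_mod_cast this

lemma pvT_mono : ∀ b a, a ≤ b → pvT a ≤ pvT b := by
  intro b
  induction b with
  | zero =>
    intro a ha
    have h0 : a = 0 := by omega
    subst h0; exact le_rfl
  | succ b ih =>
    intro a ha
    rcases Nat.lt_succ_iff_lt_or_eq.mp (Nat.lt_succ_of_le ha) with h1 | h1
    · have := ih a (by omega); simp [pvT]; omega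
    · subst h1; exact le_rfl

lemma pvT_lt_iff (j k : Nat) : pvT j < pvT k ↔ j < k := by
  constructor
  · intro h
    by_contra hc
    have := pvT_mono j k (by omega)
    omega
  · intro h
    have h1 := pvT_mono (k - 1) j (by omega)
    have h2 : pvT (k - 1) + k = pvT k := by
      have hk : k - 1 + 1 = k := by omega
      conv_rhs => rw [← hk]
      simp [pvT]; omega
    omega

lemma pvTriDiv (x : Int) : 2 * (x * (x + 1) / 2) = x * (x + 1) := by
  rcases Int.even_mul_succ_self x with ⟨m, hm⟩
  rw [hm]
  have h2 : m + m = 2 * m := by ring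
  rw [h2, Int.mul_ediv_cancel_left m (by norm_num)]

lemma pvT_nat_two (w : Nat) : 2 * pvT w = w * (w + 1) := by
  have := pvT_two w; exact_mod_cast this

lemma whileA_run (w : Nat) (hw : 1 ≤ w) (fuel : Nat) :
    pvWhileA (fuel + 3) ((w : Int) - 2) ((pvT w : Int)) = (w : Int) := by
  have htw : 2 * (pvT w : Int) = w * (w + 1) := pvT_two w
  have c1 : ((w : Int) - 2) * ((w : Int) - 2 + 1) / 2 < (pvT w : Int) := by
    have hd := pvTriDiv ((w : Int) - 2)
    have e1 : ((w : Int) - 2) * ((w : Int) - 2 + 1) + 4 * (w : Int) - 2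
        = (w : Int) * ((w : Int) + 1) := by ring
    have hw' : (1 : Int) ≤ (w : Int) := by exact_mod_cast hw
    omega
  have c2 : ((w : Int) - 1) * ((w : Int) - 1 + 1) / 2 < (pvT w : Int) := by
    have hd := pvTriDiv ((w : Int) - 1)
    have e1 : ((w : Int) - 1) * ((w : Int) - 1 + 1) + 2 * (w : Int)
        = (w : Int) * ((w : Int) + 1) := by ring
    have hw' : (1 : Int) ≤ (w : Int) := by exact_mod_cast hw
    omega
  have c3 : ¬ ((w : Int)) * ((w : Int) + 1) / 2 < (pvT w : Int) := by
    have hd := pvTriDiv ((w : Int))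
    omega
  show pvWhileA (fuel + 1 + 1 + 1) ((w : Int) - 2) ((pvT w : Int)) = (w : Int)
  rw [pvWhileA, if_pos c1]
  have e2 : (w : Int) - 2 + 1 = (w : Int) - 1 := by ring
  rw [e2, pvWhileA, if_pos c2]
  have e3 : (w : Int) - 1 + 1 = (w : Int) := by ring
  rw [e3, pvWhileA, if_neg c3]

lemma sqrt_of_tri (w : Nat) : Nat.sqrt (1 + 8 * pvT w) = 2 * w + 1 := by
  have hp := pvT_nat_two w
  have e : 1 + 8 * pvT w = (2 * w + 1) ^ 2 := by
    have : (2 * w + 1) ^ 2 = 4 * (w * (w + 1)) + 1 := by ring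
    omega
  rw [e, Nat.sqrt_eq']

lemma getWidth_tri (w : Nat) (hw : 1 ≤ w) (data : List String) (hlen : data.length = pvT w) :
    pvGetWidth data = some (w : Int) := by
  have e1 : (2 * w + 1 - 1) / 2 = w := by omega
  have e2 : pvT w + 4 = (pvT w + 1) + 3 := by omega
  simp only [pvGetWidth, hlen, sqrt_of_tri, e1, e2, whileA_run w hw]
  have hd := pvTriDiv ((w : Int))
  have htw : 2 * (pvT w : Int) = w * (w + 1) := pvT_two w
  have : (w : Int) * ((w : Int) + 1) / 2 = (pvT w : Int) := by omega
  simp [this]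

lemma whileB_run (w : Nat) : ∀ fuel k, k ≤ w → w - k ≤ fuel →
    pvWhileB fuel ((k : Int), (pvT k : Int)) ((pvT w : Int)) = ((w : Int), (pvT w : Int)) := by
  intro fuel
  induction fuel with
  | zero =>
    intro k hk hf
    have : k = w := by omega
    subst this
    rfl
  | succ fuel ih =>
    intro k hk hf
    rw [pvWhileB]
    by_cases hkw : k < w
    · rw [if_pos (by exact_mod_cast (pvT_lt_iff k w).mpr hkw)]
      have e : ((k : Int) + 1, (pvT k : Int) + ((k : Int) + 1)) = (((k+1 : Nat) : Int), ((pvT (k+1) : Nat) : Int)) := by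
        have h1 : ((k : Int) + 1) = ((k + 1 : Nat) : Int) := by push_cast; ring
        have h2 : (pvT k : Int) + ((k : Int) + 1) = ((pvT (k+1) : Nat) : Int) := by
          simp only [pvT]; push_cast; ring
        rw [h1] at h2 ⊢
        rw [h2]
      rw [e]
      exact ih (k + 1) (by omega) (by omega)
    · have : k = w := by omega
      subst this
      rw [if_neg (by omega)]

lemma pvS_mono (w : Nat) : ∀ r' r, r ≤ r' → pvS w r ≤ pvS w r' := by
  intro r'
  induction r' with
  | zero =>
    intro r hr
    have h0 : r = 0 := by omega
    subst h0; exact le_rfl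
  | succ r' ih =>
    intro r hr
    rcases Nat.lt_succ_iff_lt_or_eq.mp (Nat.lt_succ_of_le hr) with h1 | h1
    · have := ih r (by omega); simp [pvS]; omega
    · subst h1; exact le_rfl

lemma pvS_succ (w r : Nat) : pvS w (r + 1) = pvS w r + (w - r) := rfl

lemma pvS_lt_T (w r c : Nat) (hr : r < w) (hc : c < w - r) : pvS w r + c < pvT w := by
  have h1 : pvS w (r + 1) ≤ pvS w w := pvS_mono w w (r + 1) (by omega)
  have h2 := pvS_self w
  have h3 := pvS_succ w r
  omega

-- the inner column loop of _snake_to_serial: a run of List.set at columns e, e+1, …, e+len-1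
lemma setRun (f : Int → String) : ∀ (len e : Nat) (serial : List String),
    ((PySem.List.pyRange (e : Int) ((e : Int) + (len : Int)) 1).foldl
      (fun ser col => ser.set col.toNat (f col)) serial).length = serial.length ∧
    ∀ j : Nat,
      ((PySem.List.pyRange (e : Int) ((e : Int) + (len : Int)) 1).foldl
        (fun ser col => ser.set col.toNat (f col)) serial)[j]? =
      if e ≤ j ∧ j < e + len ∧ j < serial.length then some (f (j : Int)) else serial[j]? := by
  intro len
  induction len with
  | zero =>
    intro e serial
    have h0 : PySem.List.pyRange (e : Int) ((e : Int) + ((0 : Nat) : Int)) 1 = [] := by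
      rw [PySem.List.pyRange_one]
      simp
    rw [h0]
    refine ⟨rfl, ?_⟩
    intro j
    rw [if_neg (by omega)]
    rfl
  | succ len ih =>
    intro e serial
    have hcons : PySem.List.pyRange (e : Int) ((e : Int) + ((len + 1 : Nat) : Int)) 1 =
        (e : Int) :: PySem.List.pyRange ((e + 1 : Nat) : Int) (((e + 1 : Nat) : Int) + (len : Nat)) 1 := by
      have h1 : ((e : Int) + 1) = ((e + 1 : Nat) : Int) := by push_cast; ring
      have h2 : (e : Int) + ((len + 1 : Nat) : Int) = ((e + 1 : Nat) : Int) + ((len : Nat) : Int) := by push_cast; ring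
      rw [PySem.List.pyRange_one_cons (by push_cast; omega), h1, h2]
    rw [hcons]
    simp only [List.foldl_cons, Int.toNat_natCast]
    obtain ⟨ihlen, ihget⟩ := ih (e + 1) (serial.set e (f (e : Int)))
    refine ⟨by rw [ihlen]; simp, ?_⟩
    intro j
    rw [ihget j]
    rw [List.length_set, List.getElem?_set]
    by_cases h1 : e + 1 ≤ j ∧ j < e + 1 + len ∧ j < serial.length
    · rw [if_pos h1, if_pos (by omega)]
    · rw [if_neg h1]
      by_cases h2 : e = j
      · subst h2
        by_cases h3 : e < serial.length
        · rw [if_pos rfl, if_pos h3, if_pos (by omega)]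
        · rw [if_pos rfl, if_neg h3, if_neg (by omega), List.getElem?_eq_none (by omega)]
      · rw [if_neg h2, if_neg (by omega)]

def pvRowOp (width : Int) (data : List String) (serial : List String) (row : Int) : List String :=
  if PySem.Int.mod row 2 ≠ 0 then
    let startIndex := PySem.Int.floordiv ((row + 1) * (width + width - row)) 2 - 1
    let endIndex := startIndex - width + row + 1
    (PySem.List.pyRange endIndex (startIndex + 1) 1).foldl
      (fun serial column =>
        serial.set column.toNat (PySem.List.pyGetD data (startIndex - column + endIndex) ""))
      serial
  else serial

lemma snake_eq (width : Int) (data : List String) :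
    pvSnakeToSerial width data = (PySem.List.pyRange 0 width 1).foldl (pvRowOp width data) data := rfl

lemma rowOp_even (w k : Nat) (L R : List String) (heven : k % 2 = 0) :
    pvRowOp (w : Int) L R (k : Int) = R := by
  have hmod : PySem.Int.mod (k : Int) 2 = ((k % 2 : Nat) : Int) := by
    exact_mod_cast PySem.Int.mod_natCast k 2
  unfold pvRowOp
  rw [hmod, heven]
  simp

lemma pvS_two' (w r : Nat) (hr : r ≤ w) :
    2 * (pvS w r : Int) = (r : Int) * (2 * (w : Int) + 1 - (r : Int)) := pvS_two w r hr

lemma rowOp_odd (w k : Nat) (L R : List String) (hL : L.length = pvT w) (hR : R.length = pvT w)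
    (hk : k < w) (hodd : k % 2 = 1) :
    (pvRowOp (w : Int) L R (k : Int)).length = pvT w ∧
    ∀ j : Nat, (pvRowOp (w : Int) L R (k : Int))[j]? =
      if pvS w k ≤ j ∧ j < pvS w k + (w - k) then L[2 * pvS w k + (w - k) - 1 - j]? else R[j]? := by
  have hmod : PySem.Int.mod (k : Int) 2 = ((k % 2 : Nat) : Int) := by
    exact_mod_cast PySem.Int.mod_natCast k 2
  have hfd : PySem.Int.floordiv (((k : Int) + 1) * ((w : Int) + (w : Int) - (k : Int))) 2
      = ((pvS w (k + 1) : Nat) : Int) := by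
    have h2 := pvS_two' w (k + 1) (by omega)
    have he : ((k : Int) + 1) * ((w : Int) + (w : Int) - (k : Int)) = 2 * ((pvS w (k + 1) : Nat) : Int) := by
      rw [h2]; push_cast; ring
    rw [he, PySem.Int.floordiv_eq_ediv_of_pos (by norm_num),
      Int.mul_ediv_cancel_left _ (by norm_num)]
  have hsucc : pvS w (k + 1) = pvS w k + (w - k) := pvS_succ w k
  have hlow : ((pvS w (k + 1) : Nat) : Int) - 1 - (w : Int) + (k : Int) + 1 = ((pvS w k : Nat) : Int) := by
    omega
  have hup : ((pvS w (k + 1) : Nat) : Int) - 1 + 1 = ((pvS w k : Nat) : Int) + ((w - k : Nat) : Int) := by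
    omega
  have hbody : pvRowOp (w : Int) L R (k : Int) =
      (PySem.List.pyRange ((pvS w k : Nat) : Int) (((pvS w k : Nat) : Int) + ((w - k : Nat) : Int)) 1).foldl
        (fun serial column =>
          serial.set column.toNat
            (PySem.List.pyGetD L (((pvS w (k + 1) : Nat) : Int) - 1 - column + ((pvS w k : Nat) : Int)) ""))
        R := by
    unfold pvRowOp
    rw [if_pos (by rw [hmod, hodd]; norm_num)]
    simp only [hfd, hlow, hup]
  rw [hbody]
  obtain ⟨hlen, hget⟩ := setRun
    (fun column => PySem.List.pyGetD L (((pvS w (k + 1) : Nat) : Int) - 1 - column + ((pvS w k : Nat) : Int)) "")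
    (w - k) (pvS w k) R
  refine ⟨by rw [hlen, hR], ?_⟩
  intro j
  rw [hget j]
  by_cases hj : pvS w k ≤ j ∧ j < pvS w k + (w - k)
  · have hjT : j < pvT w := by
      have := pvS_lt_T w k (j - pvS w k) hk (by omega)
      omega
    rw [if_pos (by omega), if_pos hj]
    have hidx : 2 * pvS w k + (w - k) - 1 - j < pvT w := by
      have := pvS_lt_T w k (2 * pvS w k + (w - k) - 1 - j - pvS w k) hk (by omega)
      omega
    have hidx' : 2 * pvS w k + (w - k) - 1 - j < L.length := by omega
    have hie : ((pvS w (k + 1) : Nat) : Int) - 1 - (j : Nat) + ((pvS w k : Nat) : Int)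
        = ((2 * pvS w k + (w - k) - 1 - j : Nat) : Int) := by
      omega
    rw [hie, PySem.List.pyGetD_ofNat L _ "" hidx', List.getElem?_eq_getElem hidx']
  · rw [if_neg (by omega), if_neg hj]

lemma snake_aux (w : Nat) (L : List String) (hL : L.length = pvT w) :
    ∀ k, k ≤ w →
      ((List.range k).foldl (fun (s : List String) (r : Nat) => pvRowOp (w : Int) L s (r : Int)) L).length = pvT w ∧
      ∀ r c, r < w → c < w - r →
        ((List.range k).foldl (fun (s : List String) (r : Nat) => pvRowOp (w : Int) L s (r : Int)) L)[pvS w r + c]? =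
          L[pvS w r + (if r < k ∧ r % 2 = 1 then w - r - 1 - c else c)]? := by
  intro k
  induction k with
  | zero =>
    intro _
    refine ⟨by simpa using hL, ?_⟩
    intro r c hr hc
    rw [if_neg (by omega)]
    rfl
  | succ k ih =>
    intro hk1
    obtain ⟨ihlen, ihget⟩ := ih (by omega)
    simp only [List.range_succ, List.foldl_append, List.foldl_cons, List.foldl_nil]
    by_cases hpar : k % 2 = 1
    · obtain ⟨hlen2, hget2⟩ := rowOp_odd w k L _ hL ihlen (by omega) hpar
      refine ⟨hlen2, ?_⟩
      intro r c hr hc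
      rw [hget2 (pvS w r + c)]
      by_cases hrk : r = k
      · subst hrk
        rw [if_pos (by omega)]
        have hidx : 2 * pvS w r + (w - r) - 1 - (pvS w r + c) = pvS w r + (w - r - 1 - c) := by
          omega
        rw [hidx, if_pos ⟨by omega, hpar⟩]
      · rcases Nat.lt_or_ge r k with hlt | hge
        · have hb1 : pvS w (r + 1) ≤ pvS w k := pvS_mono w k (r + 1) (by omega)
          have hb2 := pvS_succ w r
          rw [if_neg (by omega), ihget r c hr hc]
          by_cases hro : r % 2 = 1
          · rw [if_pos (by omega), if_pos (by omega)]
          · rw [if_neg (by omega), if_neg (by omega)]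
        · have hgt : k < r := by omega
          have hb1 : pvS w (k + 1) ≤ pvS w r := pvS_mono w r (k + 1) (by omega)
          have hb2 := pvS_succ w k
          rw [if_neg (by omega), ihget r c hr hc]
          rw [if_neg (by omega), if_neg (by omega)]
    · rw [rowOp_even w k L _ (by omega)]
      refine ⟨ihlen, ?_⟩
      intro r c hr hc
      rw [ihget r c hr hc]
      by_cases hro : r % 2 = 1
      · by_cases hrk2 : r < k
        · rw [if_pos (by omega), if_pos (by omega)]
        · rw [if_neg (by omega), if_neg (by omega)]
      · rw [if_neg (by omega), if_neg (by omega)]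

lemma snake_get (w : Nat) (L : List String) (hL : L.length = pvT w) :
    (pvSnakeToSerial (w : Int) L).length = pvT w ∧
    ∀ r c, r < w → c < w - r →
      (pvSnakeToSerial (w : Int) L)[pvS w r + c]? =
        L[pvS w r + (if r % 2 = 1 then w - r - 1 - c else c)]? := by
  have hr : PySem.List.pyRange 0 (w : Int) 1 = (List.range w).map (fun (k : Nat) => (k : Int)) := by
    rw [PySem.List.pyRange_one]
    simp
  have he : pvSnakeToSerial (w : Int) L =
      (List.range w).foldl (fun (s : List String) (r : Nat) => pvRowOp (w : Int) L s (r : Int)) L := by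
    rw [snake_eq, hr, List.foldl_map]
  obtain ⟨h1, h2⟩ := snake_aux w L hL w le_rfl
  rw [he]
  refine ⟨h1, ?_⟩
  intro r c hrw hc
  rw [h2 r c hrw hc]
  by_cases hro : r % 2 = 1
  · rw [if_pos ⟨hrw, hro⟩, if_pos hro]
  · rw [if_neg (by omega), if_neg hro]

def pvMapA (width : Int) : List Int :=
  (PySem.List.pyRange 0 width 1).foldl (fun mapping row =>
    let currentWidth := width - row
    (PySem.List.pyRange 0 currentWidth 1).foldl (fun mapping column =>
      mapping ++ [currentWidth - 1 +
        PySem.Int.floordiv (column * (width - 1 + width - column)) 2]) mapping) []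

lemma flatMap_get {α β : Type} (F : β → List α) :
    ∀ (l : List β) (i c : Nat) (hi : i < l.length), c < (F l[i]).length →
      (l.flatMap F)[((l.take i).map (fun x => (F x).length)).sum + c]? = (F l[i])[c]? := by
  intro l
  induction l with
  | nil => intro i c hi; exact absurd hi (by simp)
  | cons a l ih =>
    intro i c hi hc
    cases i with
    | zero =>
      simp only [List.take_zero, List.map_nil, List.sum_nil, Nat.zero_add, List.flatMap_cons,
        List.getElem_cons_zero] at *
      rw [List.getElem?_append_left hc]
    | succ i =>
      simp only [List.take_succ_cons, List.map_cons, List.sum_cons, List.flatMap_cons,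
        List.getElem_cons_succ] at *
      rw [List.getElem?_append_right (by omega)]
      have he : (F a).length + (((l.take i).map (fun x => (F x).length)).sum + c) - (F a).length
          = ((l.take i).map (fun x => (F x).length)).sum + c := by omega
      rw [Nat.add_assoc, he]
      have hl : (a :: l).length = l.length + 1 := by simp
      exact ih i c (by omega) hc

lemma sum_rows (w : Nat) : ∀ r, r ≤ w →
    (((List.range w).take r).map (fun x => w - x)).sum = pvS w r := by
  intro r
  induction r with
  | zero => simp [pvS]
  | succ r ih =>
    intro hr
    rw [List.take_range, Nat.min_eq_left (by omega), List.range_succ, List.map_append,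
      List.sum_append]
    have := ih (by omega)
    rw [List.take_range, Nat.min_eq_left (by omega)] at this
    rw [this]
    simp [pvS_succ]

lemma mapA_eq (w : Nat) : pvMapA (w : Int) =
    (List.range w).flatMap (fun r =>
      (List.range (w - r)).map (fun c => ((pvS w c + (w - 1 - r - c) : Nat) : Int))) := by
  have hr0 : ∀ m : Nat, PySem.List.pyRange 0 (m : Int) 1 = (List.range m).map (fun (k : Nat) => (k : Int)) := by
    intro m
    rw [PySem.List.pyRange_one]
    simp
  unfold pvMapA
  simp only [PySem.List.foldl_append_singleton_eq_map, PySem.List.foldl_append_eq_flatMap,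
    List.nil_append]
  rw [hr0 w, List.flatMap_map]
  apply List.flatMap_congr
  intro r hr
  have hrw : r < w := List.mem_range.mp hr
  have hcast : (w : Int) - (r : Int) = ((w - r : Nat) : Int) := by omega
  rw [hcast, hr0 (w - r), List.map_map]
  apply List.map_congr_left
  intro c hc
  have hcw : c < w - r := List.mem_range.mp hc
  simp only [Function.comp]
  have h2 := pvS_two' w c (by omega)
  have hfd : PySem.Int.floordiv ((c : Int) * ((w : Int) - 1 + (w : Int) - (c : Int))) 2
      = ((pvS w c : Nat) : Int) - (c : Int) := by
    have he : (c : Int) * ((w : Int) - 1 + (w : Int) - (c : Int))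
        = 2 * (((pvS w c : Nat) : Int) - (c : Int)) := by
      linear_combination -h2
    rw [he, PySem.Int.floordiv_eq_ediv_of_pos (by norm_num),
      Int.mul_ediv_cancel_left _ (by norm_num)]
  rw [hfd]
  push_cast
  omega

lemma mapA_get (w r c : Nat) (hr : r < w) (hc : c < w - r) :
    (pvMapA (w : Int))[pvS w r + c]? = some ((pvS w c + (w - 1 - r - c) : Nat) : Int) := by
  rw [mapA_eq]
  have hlen : ∀ x, ((List.range (w - x)).map
      (fun c => ((pvS w c + (w - 1 - x - c) : Nat) : Int))).length = w - x := by
    intro x; simp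
  have hget := flatMap_get (fun x => (List.range (w - x)).map
      (fun c => ((pvS w c + (w - 1 - x - c) : Nat) : Int))) (List.range w) r c
    (by simpa using hr) (by simp only [List.getElem_range]; rw [hlen r]; exact hc)
  have hsum : (((List.range w).take r).map (fun x => ((List.range (w - x)).map
      (fun c => ((pvS w c + (w - 1 - x - c) : Nat) : Int))).length)).sum = pvS w r := by
    have hcg : (((List.range w).take r).map (fun x => ((List.range (w - x)).map
        (fun c => ((pvS w c + (w - 1 - x - c) : Nat) : Int))).length))
        = ((List.range w).take r).map (fun x => w - x) := by
      apply List.map_congr_left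
      intro x _
      exact hlen x
    rw [hcg]
    exact sum_rows w r (by omega)
  rw [hsum] at hget
  rw [hget]
  simp only [List.getElem_range]
  rw [List.getElem?_map, List.getElem?_range hc]
  rfl

def pvRotA (width : Int) (data : List String) : List String :=
  let mapping := pvMapA width
  let data1 := pvSnakeToSerial width data
  let rotated1 := (PySem.List.pyRange 0 (data1.length : Int) 1).map
    (fun i => PySem.List.pyGetD data1 (PySem.List.pyGetD mapping i 0) "")
  let rotated2 := (PySem.List.pyRange 0 (data1.length : Int) 1).map
    (fun i => PySem.List.pyGetD rotated1 (PySem.List.pyGetD mapping i 0) "")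
  pvSnakeToSerial width rotated2

lemma rotate_data_of_some (data : List String) (width : Int)
    (h : pvGetWidth data = some width) : rotate_data data = pvRotA width data := by
  unfold rotate_data pvRotA pvMapA
  rw [h]

lemma rotStep (w : Nat) (dat : List String) (mapping : List Int) :
    ((PySem.List.pyRange 0 ((pvT w : Nat) : Int) 1).map
      (fun i => PySem.List.pyGetD dat (PySem.List.pyGetD mapping i 0) "")).length = pvT w ∧
    ∀ j : Nat, j < pvT w →
      ((PySem.List.pyRange 0 ((pvT w : Nat) : Int) 1).map
        (fun i => PySem.List.pyGetD dat (PySem.List.pyGetD mapping i 0) ""))[j]? =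
      some (PySem.List.pyGetD dat (PySem.List.pyGetD mapping ((j : Nat) : Int) 0) "") := by
  have hr0 : PySem.List.pyRange 0 ((pvT w : Nat) : Int) 1
      = (List.range (pvT w)).map (fun (k : Nat) => (k : Int)) := by
    rw [PySem.List.pyRange_one]
    simp
  rw [hr0, List.map_map]
  refine ⟨by simp, ?_⟩
  intro j hj
  rw [List.getElem?_map, List.getElem?_range hj]
  rfl

lemma decomp (w : Nat) : ∀ j, j < pvT w → ∃ r c, r < w ∧ c < w - r ∧ j = pvS w r + c := by
  have aux : ∀ d r j, w - r = d → r ≤ w → pvS w r ≤ j → j < pvT w →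
      ∃ r' c, r' < w ∧ c < w - r' ∧ j = pvS w r' + c := by
    intro d
    induction d with
    | zero =>
      intro r j hd hr hs hj
      have hrw : r = w := by omega
      rw [hrw, pvS_self w] at hs
      omega
    | succ d ih =>
      intro r j hd hr hs hj
      by_cases hcase : j < pvS w r + (w - r)
      · exact ⟨r, j - pvS w r, by omega, by omega, by omega⟩
      · have h1 := pvS_succ w r
        exact ih (r + 1) j (by omega) (by omega) (by omega) hj
  intro j hj
  exact aux w 0 j (by omega) (by omega) (by simp [pvS]) hj

-- the composed source index: de-snake, rotate by 120°, re-snake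
def pvTgt (w r c : Nat) : Nat :=
  let cc := if r % 2 = 1 then w - r - 1 - c else c
  let sr := w - 1 - r - cc
  pvS w sr + (if sr % 2 = 1 then w - sr - 1 - r else r)

lemma pvTgt_lt (w r c : Nat) (hr : r < w) (hc : c < w - r) : pvTgt w r c < pvT w := by
  unfold pvTgt
  have hcc : (if r % 2 = 1 then w - r - 1 - c else c) < w - r := by
    by_cases h : r % 2 = 1 <;> simp [h] <;> omega
  set cc := if r % 2 = 1 then w - r - 1 - c else c with hccd
  have hsr : w - 1 - r - cc < w := by omega
  have hcol : (if (w - 1 - r - cc) % 2 = 1 then w - (w - 1 - r - cc) - 1 - r else r)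
      < w - (w - 1 - r - cc) := by
    by_cases h : (w - 1 - r - cc) % 2 = 1 <;> simp [h] <;> omega
  exact pvS_lt_T w _ _ hsr hcol

lemma pyGetD_of_getElem? {α : Type} (xs : List α) (j : Nat) (v d : α) (h : xs[j]? = some v) :
    PySem.List.pyGetD xs ((j : Nat) : Int) d = v := by
  rw [PySem.List.pyGetD_natCast, List.getD_eq_getElem?_getD, h]
  rfl

lemma rotA_get (w : Nat) (L : List String) (hL : L.length = pvT w) :
    (pvRotA (w : Int) L).length = pvT w ∧
    ∀ r c, r < w → c < w - r → (pvRotA (w : Int) L)[pvS w r + c]? = L[pvTgt w r c]? := by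
  obtain ⟨hd1len, hd1get⟩ := snake_get w L hL
  set data1 := pvSnakeToSerial (w : Int) L with hdata1
  set rot1 := (PySem.List.pyRange 0 ((pvT w : Nat) : Int) 1).map
    (fun i => PySem.List.pyGetD data1 (PySem.List.pyGetD (pvMapA (w : Int)) i 0) "") with hrot1
  set rot2 := (PySem.List.pyRange 0 ((pvT w : Nat) : Int) 1).map
    (fun i => PySem.List.pyGetD rot1 (PySem.List.pyGetD (pvMapA (w : Int)) i 0) "") with hrot2
  have hrotA : pvRotA (w : Int) L = pvSnakeToSerial (w : Int) rot2 := by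
    simp only [pvRotA]
    rw [← hdata1, hd1len, ← hrot1, ← hrot2]
  obtain ⟨h1len, h1get⟩ := rotStep w data1 (pvMapA (w : Int))
  rw [← hrot1] at h1len h1get
  obtain ⟨h2len, h2get⟩ := rotStep w rot1 (pvMapA (w : Int))
  rw [← hrot2] at h2len h2get
  obtain ⟨houtlen, houtget⟩ := snake_get w rot2 h2len
  rw [hrotA]
  refine ⟨houtlen, ?_⟩
  intro r c hr hc
  rw [houtget r c hr hc]
  set cc := if r % 2 = 1 then w - r - 1 - c else c with hccd
  have hcc : cc < w - r := by
    rw [hccd]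
    by_cases h : r % 2 = 1 <;> simp [h] <;> omega
  set d := w - 1 - r - cc with hdd
  have hdw : d < w := by omega
  have hdcol : d < w - cc := by omega
  have hrcol : r < w - d := by omega
  -- step 2: rot2 at row r, col cc
  have hj1 : pvS w r + cc < pvT w := pvS_lt_T w r cc hr hcc
  rw [h2get (pvS w r + cc) hj1]
  -- step 3: mapping at (r, cc)
  have hm1 : PySem.List.pyGetD (pvMapA (w : Int)) ((pvS w r + cc : Nat) : Int) 0
      = ((pvS w cc + d : Nat) : Int) := by
    apply pyGetD_of_getElem?
    rw [mapA_get w r cc hr hcc]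
  rw [hm1]
  -- step 4: rot1 at m1 = pvS w cc + d
  have hm1T : pvS w cc + d < pvT w := pvS_lt_T w cc d (by omega) hdcol
  have h4 : PySem.List.pyGetD rot1 ((pvS w cc + d : Nat) : Int) ""
      = PySem.List.pyGetD data1 (PySem.List.pyGetD (pvMapA (w : Int)) ((pvS w cc + d : Nat) : Int) 0) "" := by
    apply pyGetD_of_getElem?
    rw [h1get (pvS w cc + d) hm1T]
  rw [h4]
  -- step 5: mapping at (cc, d)
  have hm2 : PySem.List.pyGetD (pvMapA (w : Int)) ((pvS w cc + d : Nat) : Int) 0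
      = ((pvS w d + r : Nat) : Int) := by
    have := mapA_get w cc d (by omega) hdcol
    have he : w - 1 - cc - d = r := by omega
    rw [he] at this
    exact pyGetD_of_getElem? _ _ _ _ this
  rw [hm2]
  -- step 6: data1 at row d, col r
  have h6 : data1[pvS w d + r]? = L[pvTgt w r c]? := by
    have := hd1get d r hdw hrcol
    rw [this]
    simp only [pvTgt]
    rw [← hccd, ← hdd]
  have htgt : pvTgt w r c < pvT w := pvTgt_lt w r c hr hc
  obtain ⟨v, hv⟩ : ∃ v, L[pvTgt w r c]? = some v :=
    ⟨L[pvTgt w r c]'(by omega), List.getElem?_eq_getElem (by omega)⟩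
  rw [pyGetD_of_getElem? data1 (pvS w d + r) v "" (by rw [h6, hv]), hv]

def pvGatherB (w : Int) (data : List String) : List String :=
  (PySem.List.pyRange 0 w 1).foldl (fun out r =>
    let rowlen := w - r
    (PySem.List.pyRange 0 rowlen 1).foldl (fun out c =>
      let cc := if PySem.Int.mod r 2 = 0 then c else rowlen - 1 - c
      let sr := w - 1 - r - cc
      let sc := r
      let k := PySem.Int.floordiv (sr * (2 * w + 1 - sr)) 2 +
        (if PySem.Int.mod sr 2 = 0 then sc else w - 1 - sr - sc)
      out ++ [PySem.List.pyGetD data k ""]) out) []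

lemma pvT_ge (w : Nat) : w ≤ pvT w := by
  induction w with
  | zero => simp [pvT]
  | succ w ih => simp only [pvT]; omega

lemma alt_eq (w : Nat) (L : List String) (hL : L.length = pvT w) :
    rotate_data_alt L = pvGatherB (w : Int) L := by
  have hwb : pvWhileB (pvT w + 1) (0, 0) ((pvT w : Nat) : Int) = ((w : Int), ((pvT w : Nat) : Int)) := by
    have h := whileB_run w (pvT w + 1) 0 (by omega) (by have := pvT_ge w; omega)
    simpa [pvT] using h
  simp only [rotate_data_alt, hL, hwb]
  rw [if_neg (by simp)]
  rfl

lemma gatherB_eq (w : Nat) : ∀ L : List String, pvGatherB (w : Int) L =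
    (List.range w).flatMap (fun r => (List.range (w - r)).map (fun c =>
      PySem.List.pyGetD L ((pvTgt w r c : Nat) : Int) "")) := by
  intro L
  have hr0 : ∀ m : Nat, PySem.List.pyRange 0 (m : Int) 1 = (List.range m).map (fun (k : Nat) => (k : Int)) := by
    intro m
    rw [PySem.List.pyRange_one]
    simp
  unfold pvGatherB
  simp only [PySem.List.foldl_append_singleton_eq_map, PySem.List.foldl_append_eq_flatMap,
    List.nil_append]
  rw [hr0 w, List.flatMap_map]
  apply List.flatMap_congr
  intro r hr
  have hrw : r < w := List.mem_range.mp hr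
  have hmodr : PySem.Int.mod (r : Int) 2 = ((r % 2 : Nat) : Int) := by
    exact_mod_cast PySem.Int.mod_natCast r 2
  have hcast : (w : Int) - (r : Int) = ((w - r : Nat) : Int) := by omega
  rw [hcast, hr0 (w - r), List.map_map]
  apply List.map_congr_left
  intro c hc
  have hcw : c < w - r := List.mem_range.mp hc
  simp only [Function.comp]
  -- the serial column cc
  set ccN := if r % 2 = 1 then w - r - 1 - c else c with hccN
  have hccNb : ccN < w - r := by
    rw [hccN]; by_cases h : r % 2 = 1 <;> simp [h] <;> omega
  have hcc : (if PySem.Int.mod (r : Int) 2 = 0 then (c : Int) else ((w - r : Nat) : Int) - 1 - (c : Int))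
      = ((ccN : Nat) : Int) := by
    rw [hmodr, hccN]
    by_cases h : r % 2 = 1
    · rw [h, if_neg (by norm_num), if_pos rfl]
      omega
    · have h0 : r % 2 = 0 := by omega
      rw [h0, if_pos (by norm_num), if_neg (by norm_num)]
  rw [hcc]
  set srN := w - 1 - r - ccN with hsrN
  have hsr : (w : Int) - 1 - (r : Int) - ((ccN : Nat) : Int) = ((srN : Nat) : Int) := by
    rw [hsrN]; omega
  rw [hsr]
  have hsrw : srN ≤ w := by omega
  have hfd : PySem.Int.floordiv (((srN : Nat) : Int) * (2 * (w : Int) + 1 - ((srN : Nat) : Int))) 2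
      = ((pvS w srN : Nat) : Int) := by
    have h2 := pvS_two' w srN hsrw
    have he : ((srN : Nat) : Int) * (2 * (w : Int) + 1 - ((srN : Nat) : Int))
        = 2 * ((pvS w srN : Nat) : Int) := by
      linear_combination -h2
    rw [he, PySem.Int.floordiv_eq_ediv_of_pos (by norm_num),
      Int.mul_ediv_cancel_left _ (by norm_num)]
  rw [hfd]
  have hmods : PySem.Int.mod ((srN : Nat) : Int) 2 = ((srN % 2 : Nat) : Int) := by
    exact_mod_cast PySem.Int.mod_natCast srN 2
  have hk : ((pvS w srN : Nat) : Int) +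
      (if PySem.Int.mod ((srN : Nat) : Int) 2 = 0 then (r : Int)
        else (w : Int) - 1 - ((srN : Nat) : Int) - (r : Int))
      = ((pvTgt w r c : Nat) : Int) := by
    have htg : pvTgt w r c = pvS w srN + (if srN % 2 = 1 then w - srN - 1 - r else r) := by
      simp only [pvTgt]
      rw [← hccN, ← hsrN]
    rw [htg, hmods]
    by_cases h : srN % 2 = 1
    · rw [h, if_neg (by norm_num), if_pos rfl]
      push_cast
      omega
    · have h0 : srN % 2 = 0 := by omega
      rw [h0, if_pos (by norm_num), if_neg (by norm_num)]
      push_cast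
      omega
  rw [hk]

lemma gatherB_len (w : Nat) (L : List String) : (pvGatherB (w : Int) L).length = pvT w := by
  rw [gatherB_eq, List.length_flatMap]
  have hcg : ((List.range w).map (fun r => ((List.range (w - r)).map (fun c =>
      PySem.List.pyGetD L ((pvTgt w r c : Nat) : Int) "")).length))
      = (List.range w).map (fun x => w - x) := by
    apply List.map_congr_left
    intro x _
    simp
  rw [hcg]
  have := sum_rows w w le_rfl
  rw [List.take_range, Nat.min_eq_left le_rfl] at this
  rw [this, pvS_self]

lemma gatherB_get (w r c : Nat) (L : List String) (hr : r < w) (hc : c < w - r) :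
    (pvGatherB (w : Int) L)[pvS w r + c]? =
      some (PySem.List.pyGetD L ((pvTgt w r c : Nat) : Int) "") := by
  rw [gatherB_eq]
  have hlen : ∀ x, ((List.range (w - x)).map (fun c =>
      PySem.List.pyGetD L ((pvTgt w x c : Nat) : Int) "")).length = w - x := by
    intro x; simp
  have hget := flatMap_get (fun x => (List.range (w - x)).map (fun c =>
      PySem.List.pyGetD L ((pvTgt w x c : Nat) : Int) "")) (List.range w) r c
    (by simpa using hr) (by simp only [List.getElem_range]; rw [hlen r]; exact hc)
  have hsum : (((List.range w).take r).map (fun x => ((List.range (w - x)).map (fun c =>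
      PySem.List.pyGetD L ((pvTgt w x c : Nat) : Int) "")).length)).sum = pvS w r := by
    have hcg : (((List.range w).take r).map (fun x => ((List.range (w - x)).map (fun c =>
        PySem.List.pyGetD L ((pvTgt w x c : Nat) : Int) "")).length))
        = ((List.range w).take r).map (fun x => w - x) := by
      apply List.map_congr_left
      intro x _
      exact hlen x
    rw [hcg]
    exact sum_rows w r (by omega)
  rw [hsum] at hget
  rw [hget]
  simp only [List.getElem_range]
  rw [List.getElem?_map, List.getElem?_range hc]
  rfl

lemma main_eq (w : Nat) (hw : 1 ≤ w) (L : List String) (hL : L.length = pvT w) :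
    rotate_data L = rotate_data_alt L := by
  rw [rotate_data_of_some L (w : Int) (getWidth_tri w hw L hL), alt_eq w L hL]
  obtain ⟨halen, haget⟩ := rotA_get w L hL
  apply List.ext_getElem?
  intro i
  by_cases hi : i < pvT w
  · obtain ⟨r, c, hr, hc, rfl⟩ := decomp w i hi
    rw [haget r c hr hc, gatherB_get w r c L hr hc]
    have htgt : pvTgt w r c < L.length := by
      rw [hL]; exact pvTgt_lt w r c hr hc
    rw [List.getElem?_eq_getElem htgt,
      PySem.List.pyGetD_ofNat L (pvTgt w r c) "" htgt]
  · rw [List.getElem?_eq_none (by omega), List.getElem?_eq_none (by rw [gatherB_len]; omega)]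

lemma pre_width (n : Nat) (h : ∃ w, w < n + 1 ∧ 1 ≤ w ∧ 2 * n = w * (w + 1)) :
    ∃ w, 1 ≤ w ∧ n = pvT w := by
  obtain ⟨w, _, hw, he⟩ := h
  have hT := pvT_nat_two w
  exact ⟨w, hw, by omega⟩

-- ===== VERDICT (by name: the statement is the Claim_ definition above) =====
theorem rotate_data_spec : Claim_equal_rotate_data := by
  intro data _ hpre
  obtain ⟨w, hw, hn⟩ := pre_width data.length hpre
  exact main_eq w hw data hn
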